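-- pv_equiv track=rewrite | github.com/MdAbedin/binarysearch | 0501 - 0600/0568 Valid State of List.py | solve
-- ===== SOURCE A (Python) =====
-- def solve(nums):
--     dp = [True]
--     nums = [None] + nums
--
--     for i in range(1,len(nums)):
--         curr = False
--
--         if i-2 >= 0 and nums[i] == nums[i-1] and dp[i-2]: curr = True
--         if i-3 >= 0 and dp[i-3]:
--             if nums[i] == nums[i-1] == nums[i-2]: curr = True
--             if nums[i-2:i] == [nums[i]-2,nums[i]-1]: curr = True
--
--         dp.append(curr)
--
--     return dp[-1]
-- ===== SOURCE B (Python) =====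
-- def solve(nums):
--     # Top-down memoized recursion over prefix length: can(j) = the first j
--     # elements split into valid groups (equal pair / equal triple / run of three).
--     memo = {0: True}
--     def can(j):
--         if j in memo:
--             return memo[j]
--         ok = (j >= 2 and nums[j-1] == nums[j-2] and can(j-2)) or \
--              (j >= 3 and can(j-3) and (nums[j-1] == nums[j-2] == nums[j-3]
--                                        or (nums[j-3] == nums[j-1]-2 and nums[j-2] == nums[j-1]-1)))
--         memo[j] = ok
--         return ok
--     for j in range(1, len(nums) + 1):
--         can(j)  # warm the memo in increasing order so recursion depth stays O(1)
--     return can(len(nums))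
-- ===== Notes on version B (the rewrite author's own statement) =====
-- stated objective: alternative
-- what changed: Replaces the bottom-up dp-list with sentinel padding and slicing by a top-down memoized recursion can(j) over prefix length that never pads or slices the input.
import Mathlib
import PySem

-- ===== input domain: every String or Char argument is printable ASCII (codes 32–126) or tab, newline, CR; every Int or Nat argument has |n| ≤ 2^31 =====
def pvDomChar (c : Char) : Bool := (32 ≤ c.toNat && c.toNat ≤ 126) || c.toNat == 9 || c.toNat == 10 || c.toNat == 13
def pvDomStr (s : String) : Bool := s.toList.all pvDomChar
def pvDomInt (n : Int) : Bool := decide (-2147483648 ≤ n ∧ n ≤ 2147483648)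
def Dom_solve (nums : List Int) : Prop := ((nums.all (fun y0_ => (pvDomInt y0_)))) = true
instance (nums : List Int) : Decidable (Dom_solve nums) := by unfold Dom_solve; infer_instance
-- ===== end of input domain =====

-- B replaces A's bottom-up dp list (over a None-padded copy of nums) by a
-- top-down memoized recursion over prefix length; same O(n) cost, no padding/slicing.

-- ===== PORT A =====
-- `nums2` is Python's `[None] + nums`.  All list accesses below are guarded so
-- they are in range in Python; pyGetD's defaults are never reached, and the
-- `.map` in the slice comparison mirrors `nums[i]-2` (only evaluated when
-- i ≥ 3, where nums2[i] is a real int).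
def solveStep (nums2 : List (Option Int)) (dp : List Bool) (i : Int) : List Bool :=
  let curr := false
  let curr := if decide (i-2 ≥ 0) && (PySem.List.pyGetD nums2 i none == PySem.List.pyGetD nums2 (i-1) none)
                 && PySem.List.pyGetD dp (i-2) false then true else curr
  let curr := if decide (i-3 ≥ 0) && PySem.List.pyGetD dp (i-3) false then
      let curr := if (PySem.List.pyGetD nums2 i none == PySem.List.pyGetD nums2 (i-1) none)
                  && (PySem.List.pyGetD nums2 (i-1) none == PySem.List.pyGetD nums2 (i-2) none) then true else curr
      let curr := if PySem.List.slice nums2 (some (i-2)) (some i)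
                     == [(PySem.List.pyGetD nums2 i none).map (· - 2), (PySem.List.pyGetD nums2 i none).map (· - 1)]
                  then true else curr
      curr
    else curr
  dp ++ [curr]

def solve (nums : List Int) : Bool :=
  PySem.List.pyGetD
    ((PySem.List.pyRange 1 (((none :: nums.map some : List (Option Int)).length : Nat) : Int) 1).foldl
      (solveStep (none :: nums.map some)) [true])
    (-1) false

-- ===== PORT B =====
-- can j = "the first j elements of nums split into valid groups" (Source B's memoized can).
-- Indices are guarded by the pattern (j ≥ 2 resp. j ≥ 3), so getD defaults are never used.
def canB (nums : List Int) : Nat → Bool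
  | 0 => true
  | 1 => false
  | 2 => (nums.getD 1 0 == nums.getD 0 0) && canB nums 0
  | (j+3) =>
      ((nums.getD (j+2) 0 == nums.getD (j+1) 0) && canB nums (j+1))
    || (canB nums j &&
        ((nums.getD (j+2) 0 == nums.getD (j+1) 0 && nums.getD (j+1) 0 == nums.getD j 0)
         || (nums.getD j 0 == nums.getD (j+2) 0 - 2 && nums.getD (j+1) 0 == nums.getD (j+2) 0 - 1)))

def solve_alt (nums : List Int) : Bool := canB nums nums.length

-- ===== PRECONDITION & SPEC =====
def Spec_solve (nums : List Int) (out : Bool) : Prop := out = solve_alt nums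
instance (nums : List Int) (out : Bool) : Decidable (Spec_solve nums out) := by unfold Spec_solve; infer_instance

-- ===== CLAIM (what is proved, stated in full; the proofs are below) =====
def Claim_equal_solve : Prop := ∀ (nums : List Int), Dom_solve nums → Spec_solve nums (solve nums)


-- ===== LEMMAS AND PROOFS =====

-- nums2[k+1] is element k of nums (in range)
theorem nums2_getD (nums : List Int) (k : Nat) (hk : k < nums.length) :
    PySem.List.pyGetD (none :: nums.map some) ((k:Int)+1) (none : Option Int) = some nums[k] := by
  have h1 : ((k:Int)+1) = (((k+1 : Nat)):Int) := by push_cast; ring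
  rw [h1, PySem.List.pyGetD_natCast]
  simp [List.getD_eq_getElem?_getD, hk]

-- dp built as map over range: index k reads f k
theorem dp_getD (f : Nat → Bool) (m k : Nat) (hk : k < m) :
    PySem.List.pyGetD ((List.range m).map f) ((k:Int)) false = f k := by
  rw [PySem.List.pyGetD_natCast]
  simp [List.getD_eq_getElem?_getD, hk]

theorem step_eq (nums : List Int) (n : Nat) (hn : n < nums.length) :
    solveStep (none :: nums.map some) ((List.range (n+1)).map (canB nums)) ((n:Int)+1)
      = (List.range (n+2)).map (canB nums) := by
  rw [show n+2 = (n+1)+1 from rfl, List.range_succ (n := n+1), List.map_append]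
  unfold solveStep
  match n, hn with
  | 0, hn =>
    norm_num [canB]
  | 1, hn =>
    have g1 := nums2_getD nums 1 hn
    have g0 := nums2_getD nums 0 (by omega)
    norm_num at g1 g0 ⊢
    rw [g1, g0]
    simp [List.range_succ, canB, List.getD_eq_getElem?_getD, hn,
      show 0 < nums.length by omega, beq_eq_decide]
  | (m+2), hn =>
    have hm2 : m+2 < nums.length := hn
    have hm1 : m+1 < nums.length := by omega
    have hm0 : m < nums.length := by omega
    have eA : ((((m+2:Nat)):Int)+1) - 1 = ((m+1:Nat):Int)+1 := by push_cast; ring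
    have eB : ((((m+2:Nat)):Int)+1) - 2 = ((m:Nat):Int)+1 := by push_cast; ring
    have eC : ((((m+2:Nat)):Int)+1) - 3 = ((m:Nat):Int) := by push_cast; ring
    have eD : ((((m+2:Nat)):Int)+1) - 2 = ((m+1:Nat):Int) := by push_cast; ring
    have eI : (((m+2:Nat)):Int)+1 = ((m+3:Nat):Int) := by push_cast; ring
    have gi : PySem.List.pyGetD (none :: nums.map some) (((m+2:Nat):Int)+1) none = some nums[m+2] :=
      nums2_getD nums (m+2) hm2
    have g1 : PySem.List.pyGetD (none :: nums.map some) ((((m+2:Nat):Int)+1)-1) none = some nums[m+1] := by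
      rw [eA]; exact nums2_getD nums (m+1) hm1
    have g0 : PySem.List.pyGetD (none :: nums.map some) ((((m+2:Nat):Int)+1)-2) none = some nums[m] := by
      rw [eB]; exact nums2_getD nums m hm0
    have d2 : PySem.List.pyGetD ((List.range (m+2+1)).map (canB nums)) ((((m+2:Nat):Int)+1)-2) false
        = canB nums (m+1) := by
      rw [eD]; exact dp_getD (canB nums) (m+3) (m+1) (by omega)
    have d3 : PySem.List.pyGetD ((List.range (m+2+1)).map (canB nums)) ((((m+2:Nat):Int)+1)-3) false
        = canB nums m := by
      rw [eC]; exact dp_getD (canB nums) (m+3) m (by omega)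
    have sl : PySem.List.slice (none :: nums.map some) (some ((((m+2:Nat):Int)+1)-2)) (some (((m+2:Nat):Int)+1))
        = [some nums[m], some nums[m+1]] := by
      rw [eD, eI, PySem.List.slice_natCast]
      have h0 : m < (nums.map some).length := by simpa using hm0
      have h1 : m+1 < (nums.map some).length := by simpa using hm1
      rw [List.drop_succ_cons, List.drop_eq_getElem_cons h0, List.drop_eq_getElem_cons h1]
      simp [show m+3-(m+1) = 2 from by omega]
    have hc2 : decide (((((m+2:Nat)):Int)+1) - 2 ≥ 0) = true := by rw [eD]; simp only [ge_iff_le, decide_eq_true_eq]; omega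
    have hc3 : decide (((((m+2:Nat)):Int)+1) - 3 ≥ 0) = true := by
      rw [eC]; simp only [ge_iff_le, decide_eq_true_eq]; omega
    rw [gi, g1, g0, d2, d3, sl, hc2, hc3]
    have hcan : canB nums (m+2+1) =
        (((nums.getD (m+2) 0 == nums.getD (m+1) 0) && canB nums (m+1))
      || (canB nums m &&
          ((nums.getD (m+2) 0 == nums.getD (m+1) 0 && nums.getD (m+1) 0 == nums.getD m 0)
           || (nums.getD m 0 == nums.getD (m+2) 0 - 2 && nums.getD (m+1) 0 == nums.getD (m+2) 0 - 1)))) := rfl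
    rw [List.append_cancel_left_eq]
    simp only [List.map_cons, List.map_nil, List.cons.injEq, and_true]
    rw [hcan, List.getD_eq_getElem nums 0 hm0, List.getD_eq_getElem nums 0 hm1,
      List.getD_eq_getElem nums 0 hm2]
    simp only [Option.map_some, beq_eq_decide, List.cons.injEq, Option.some.injEq, and_true,
      Bool.decide_and]
    generalize canB nums (m+1) = x
    generalize canB nums m = y
    generalize decide (nums[m+2] = nums[m+1]) = p
    generalize decide (nums[m+1] = nums[m]) = q
    generalize decide (nums[m] = nums[m+2]-2) = r
    generalize decide (nums[m+1] = nums[m+2]-1) = s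
    cases x <;> cases y <;> cases p <;> cases q <;> cases r <;> cases s <;> rfl

theorem loop_invariant (nums : List Int) (n : Nat) (hn : n ≤ nums.length) :
    (PySem.List.pyRange 1 ((n:Int)+1) 1).foldl (solveStep (none :: nums.map some)) [true]
      = (List.range (n+1)).map (canB nums) := by
  induction n with
  | zero => simp [PySem.List.pyRange_one_eq_nil, List.range_succ, canB]
  | succ k ih =>
    have hk : k ≤ nums.length := by omega
    rw [show (((k+1:Nat)):Int)+1 = ((k:Int)+1)+1 from by push_cast; ring,
      PySem.List.pyRange_one_succ_right (by omega : (1:Int) ≤ (k:Int)+1),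
      List.foldl_append, ih hk]
    simpa using step_eq nums k (by omega)

-- ===== VERDICT (by name: the statement is the Claim_ definition above) =====
theorem solve_spec : Claim_equal_solve := by
  intro nums _
  show solve nums = solve_alt nums
  unfold solve solve_alt
  have hlen : ((((none :: nums.map some : List (Option Int))).length : Nat) : Int)
      = ((nums.length : Nat) : Int) + 1 := by push_cast [List.length_cons, List.length_map]; ring
  rw [hlen, loop_invariant nums nums.length le_rfl, List.range_succ, List.map_append]
  simp [PySem.List.pyGetD_neg_one_append_singleton]
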